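-- pv_equiv track=rewrite | github.com/blaze-fire/LangchainDemo | proxy.py | summarize_test_cases
-- ===== SOURCE A (Python) =====
-- from typing import Dict, List, Any, TypedDict, Annotated, Sequence, Optional, Tuple
--
-- def summarize_test_cases(test_cases: List[Dict]) -> str:
--     """Create a summary of test cases for feedback analysis"""
--     summary = f"Total Test Cases: {len(test_cases)}\n\n"
--
--     # Group by category
--     categories = {}
--     for tc in test_cases:
--         cat = tc.get("category", "Uncategorized")
--         if cat not in categories:
--             categories[cat] = []
--         categories[cat].append(tc)
--
--     for cat, tcs in categories.items():
--         summary += f"{cat}: {len(tcs)} test cases\n"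
--         for tc in tcs[:3]:  # Show first 3 as examples
--             summary += f"  - {tc.get('tc_id', 'No ID')}: {tc.get('name', 'No name')[:50]}\n"
--         if len(tcs) > 3:
--             summary += f"  ... and {len(tcs) - 3} more\n"
--
--     return summary
-- ===== SOURCE B (Python) =====
-- def summarize_test_cases(test_cases):
--     """Create a summary of test cases for feedback analysis"""
--     def line(tc):
--         return f"  - {tc.get('tc_id', 'No ID')}: {tc.get('name', 'No name')[:50]}\n"
--
--     def block(cat):
--         tcs = [tc for tc in test_cases if tc.get("category", "Uncategorized") == cat]
--         parts = [f"{cat}: {len(tcs)} test cases\n"]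
--         parts += [line(tc) for tc in tcs[:3]]
--         if len(tcs) > 3:
--             parts.append(f"  ... and {len(tcs) - 3} more\n")
--         return "".join(parts)
--
--     cats = list(dict.fromkeys(tc.get("category", "Uncategorized") for tc in test_cases))
--     return "".join([f"Total Test Cases: {len(test_cases)}\n\n"] + [block(c) for c in cats])
-- ===== Notes on version B (the rewrite author's own statement) =====
-- stated objective: alternative
-- what changed: Replaces A's single-pass mutable dict-of-lists grouping and string-accumulator loop by a staged, join-based decomposition: first index the first-seen-ordered distinct categories with dict.fromkeys, then render each category's block independently (re-scanning test_cases with a comprehension) as a list of lines joined at the end.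
import Mathlib
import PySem

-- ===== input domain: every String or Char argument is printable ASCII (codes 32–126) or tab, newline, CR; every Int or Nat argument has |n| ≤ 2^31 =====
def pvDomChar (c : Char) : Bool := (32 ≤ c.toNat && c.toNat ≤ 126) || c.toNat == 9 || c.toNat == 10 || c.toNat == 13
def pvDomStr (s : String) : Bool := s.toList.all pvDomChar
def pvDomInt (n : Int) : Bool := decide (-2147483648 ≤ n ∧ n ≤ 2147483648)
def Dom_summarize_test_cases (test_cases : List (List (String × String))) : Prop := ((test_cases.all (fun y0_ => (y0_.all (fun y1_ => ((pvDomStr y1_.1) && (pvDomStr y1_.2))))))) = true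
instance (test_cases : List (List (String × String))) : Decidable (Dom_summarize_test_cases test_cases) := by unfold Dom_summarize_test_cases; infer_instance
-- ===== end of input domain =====

-- B is an alternative decomposition: A grows one summary string while grouping in one pass into a
-- mutable dict of lists; B first indexes the first-seen-ordered distinct categories, then renders
-- each category's block independently by re-scanning, and joins the pieces at the end.

-- shared helper: tc.get(k, dflt) on a dict given as an association list (first match wins)
def pvGet (tc : List (String × String)) (k dflt : String) : String :=
  (PySem.Dict.mk tc).getD k dflt

-- ===== PORT A =====
def summarize_test_cases (test_cases : List (List (String × String))) : String :=
  let summary := "Total Test Cases: " ++ PySem.Int.toStr (test_cases.length : Int) ++ "\n\n"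
  let categories : PySem.Dict String (List (List (String × String))) :=
    test_cases.foldl (fun d tc =>
      let cat := pvGet tc "category" "Uncategorized"
      let d' := if d.contains cat then d else d.insert cat []
      d'.modify cat [] (· ++ [tc])) PySem.Dict.empty
  categories.items.foldl (fun s p =>
    let s := s ++ p.1 ++ ": " ++ PySem.Int.toStr (p.2.length : Int) ++ " test cases\n"
    let s := (PySem.List.slice p.2 none (some 3)).foldl
      (fun s tc => s ++ "  - " ++ pvGet tc "tc_id" "No ID" ++ ": " ++
        PySem.Str.slice (pvGet tc "name" "No name") none (some 50) ++ "\n") s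
    if (3 : Int) < (p.2.length : Int) then
      s ++ "  ... and " ++ PySem.Int.toStr ((p.2.length : Int) - 3) ++ " more\n"
    else s) summary

-- ===== PORT B =====
-- Source B's local 'line(tc)'
def pvLine (tc : List (String × String)) : String :=
  "  - " ++ pvGet tc "tc_id" "No ID" ++ ": " ++
    PySem.Str.slice (pvGet tc "name" "No name") none (some 50) ++ "\n"

-- Source B's local 'block(cat)': header, first-3 example lines, optional tail, joined
def pvBlock (test_cases : List (List (String × String))) (cat : String) : String :=
  let tcs := test_cases.filter (fun tc => pvGet tc "category" "Uncategorized" == cat)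
  let parts := ((cat ++ ": " ++ PySem.Int.toStr (tcs.length : Int) ++ " test cases\n")
        :: (PySem.List.slice tcs none (some 3)).map pvLine)
      ++ (if (3 : Int) < (tcs.length : Int)
          then ["  ... and " ++ PySem.Int.toStr ((tcs.length : Int) - 3) ++ " more\n"]
          else [])
  String.join parts

def summarize_test_cases_alt (test_cases : List (List (String × String))) : String :=
  let cats := PySem.List.dedup (test_cases.map (fun tc => pvGet tc "category" "Uncategorized"))
  String.join (("Total Test Cases: " ++ PySem.Int.toStr (test_cases.length : Int) ++ "\n\n")
    :: cats.map (pvBlock test_cases))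

-- ===== PRECONDITION & SPEC =====
def Spec_summarize_test_cases (test_cases : List (List (String × String))) (out : String) : Prop := out = summarize_test_cases_alt test_cases
instance (test_cases : List (List (String × String))) (out : String) : Decidable (Spec_summarize_test_cases test_cases out) := by unfold Spec_summarize_test_cases; infer_instance

-- ===== CLAIM =====
def Claim_equal_summarize_test_cases : Prop := ∀ (test_cases : List (List (String × String))), Dom_summarize_test_cases test_cases → Spec_summarize_test_cases test_cases (summarize_test_cases test_cases)

-- ===== LEMMAS AND PROOFS =====

-- the category of a test case, as both ports compute it
def pvKey (tc : List (String × String)) : String := pvGet tc "category" "Uncategorized"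

-- A's loop body ('if cat not in categories: categories[cat] = []; categories[cat].append(tc)')
-- equals a single modify-with-default
lemma pvStep_eq (d : PySem.Dict String (List (List (String × String))))
    (tc : List (String × String)) :
    (let cat := pvGet tc "category" "Uncategorized"
     let d' := if d.contains cat then d else d.insert cat []
     d'.modify cat [] (· ++ [tc])) = d.modify (pvKey tc) [] (· ++ [tc]) := by
  show (if d.contains (pvKey tc) then d else d.insert (pvKey tc) []).modify (pvKey tc) [] (· ++ [tc])
      = d.modify (pvKey tc) [] (· ++ [tc])
  by_cases h : d.contains (pvKey tc) = true
  · rw [if_pos h]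
  · rw [if_neg h]
    simp only [PySem.Dict.modify, PySem.Dict.getD_insert_self, PySem.Dict.insert_insert_self]
    rw [PySem.Dict.getD_of_not_contains]
    simpa using h

-- the dict A builds, characterised: its items are the distinct categories in first-seen order,
-- each paired with the tcs of that category in order
lemma pvItems_eq (test_cases : List (List (String × String))) :
    (test_cases.foldl (fun d tc =>
      let cat := pvGet tc "category" "Uncategorized"
      let d' := if d.contains cat then d else d.insert cat []
      d'.modify cat [] (· ++ [tc])) PySem.Dict.empty).items
    = (PySem.List.dedup (test_cases.map pvKey)).map
        (fun c => (c, test_cases.filter (fun tc => pvKey tc == c))) := by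
  have hstep : (fun (d : PySem.Dict String (List (List (String × String)))) tc =>
      let cat := pvGet tc "category" "Uncategorized"
      let d' := if d.contains cat then d else d.insert cat []
      d'.modify cat [] (· ++ [tc]))
      = (fun d tc => d.modify (pvKey tc) [] (· ++ [tc])) :=
    funext fun d => funext fun tc => pvStep_eq d tc
  rw [hstep]
  have hmap : (test_cases.foldl (fun d tc => d.modify (pvKey tc) [] (· ++ [tc])) PySem.Dict.empty)
      = ((test_cases.map (fun tc => (pvKey tc, tc))).foldl
          (fun d p => d.modify p.1 [] (· ++ [p.2])) PySem.Dict.empty) := by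
    rw [List.foldl_map]
  rw [hmap]
  have hnd : ((test_cases.map (fun tc => (pvKey tc, tc))).foldl
      (fun d p => d.modify p.1 [] (· ++ [p.2])) PySem.Dict.empty).keys.Nodup :=
    PySem.Dict.nodup_keys_foldl_modify_key _ _ _ _ _ PySem.Dict.nodup_keys_empty
  rw [PySem.Dict.items_eq_map_keys _ hnd ([] : List (List (String × String)))]
  have hkeys : ((test_cases.map (fun tc => (pvKey tc, tc))).foldl
      (fun d p => d.modify p.1 [] (· ++ [p.2])) PySem.Dict.empty).keys
      = PySem.List.dedup (test_cases.map pvKey) := by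
    rw [PySem.Dict.keys_foldl_modify_key]
    simp [PySem.Set.update_eq_append_filter, PySem.Set.contains, List.map_map,
      Function.comp_def]
  rw [hkeys]
  apply List.map_congr_left
  intro c _
  congr 1
  rw [PySem.Dict.getD_foldl_modify_append, PySem.Dict.getD_empty, List.filter_map]
  simp [Function.comp_def]

-- folding append is prepend-the-join
lemma pvFoldl_append (l : List String) (s0 : String) :
    l.foldl (fun r s => r ++ s) s0 = s0 ++ String.join l := by
  induction l generalizing s0 with
  | nil => simp [String.join]
  | cons a t ih =>
    have h : String.join (a :: t) = a ++ String.join t := by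
      show (a :: t).foldl (fun r s => r ++ s) "" = _
      rw [List.foldl_cons, ih]; simp
    rw [List.foldl_cons, ih, h, String.append_assoc]

lemma pvJoin_nil : String.join ([] : List String) = "" := rfl

lemma pvJoin_cons (a : String) (l : List String) :
    String.join (a :: l) = a ++ String.join l := by
  show (a :: l).foldl (fun r s => r ++ s) "" = _
  rw [List.foldl_cons, pvFoldl_append]; simp

lemma pvJoin_append (l1 l2 : List String) :
    String.join (l1 ++ l2) = String.join l1 ++ String.join l2 := by
  induction l1 with
  | nil => simp [pvJoin_nil]
  | cons a t ih => simp [pvJoin_cons, ih, String.append_assoc]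

-- an append-accumulating foldl is the initial string followed by the joined pieces
lemma pvFoldl_join {α : Type} (f : α → String) (l : List α) (s0 : String) :
    l.foldl (fun s x => s ++ f x) s0 = s0 ++ String.join (l.map f) := by
  induction l generalizing s0 with
  | nil => simp [String.join]
  | cons a t ih => simp [ih, pvJoin_cons, String.append_assoc]


-- ===== VERDICT =====
theorem summarize_test_cases_spec : Claim_equal_summarize_test_cases := by
  intro test_cases _
  unfold Spec_summarize_test_cases
  simp only [summarize_test_cases, summarize_test_cases_alt, pvItems_eq, pvKey]
  rw [List.foldl_map]
  rw [show String.join (("Total Test Cases: " ++ PySem.Int.toStr (test_cases.length : Int) ++ "\n\n")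
      :: (PySem.List.dedup (test_cases.map (fun tc => pvGet tc "category" "Uncategorized"))).map
        (pvBlock test_cases))
    = (PySem.List.dedup (test_cases.map (fun tc => pvGet tc "category" "Uncategorized"))).foldl
        (fun s c => s ++ pvBlock test_cases c)
        ("Total Test Cases: " ++ PySem.Int.toStr (test_cases.length : Int) ++ "\n\n")
    from by rw [pvFoldl_join, pvJoin_cons]]
  have hf : (fun (s : String) (c : String) =>
      (fun s (p : String × List (List (String × String))) =>
        let s := s ++ p.1 ++ ": " ++ PySem.Int.toStr (p.2.length : Int) ++ " test cases\n"
        let s := (PySem.List.slice p.2 none (some 3)).foldl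
          (fun s tc => s ++ "  - " ++ pvGet tc "tc_id" "No ID" ++ ": " ++
            PySem.Str.slice (pvGet tc "name" "No name") none (some 50) ++ "\n") s
        if (3 : Int) < (p.2.length : Int) then
          s ++ "  ... and " ++ PySem.Int.toStr ((p.2.length : Int) - 3) ++ " more\n"
        else s) s
        (c, test_cases.filter (fun tc => pvGet tc "category" "Uncategorized" == c)))
      = (fun s c => s ++ pvBlock test_cases c) := by
    funext s c
    simp only [pvBlock]
    rw [show (fun (s : String) tc => s ++ "  - " ++ pvGet tc "tc_id" "No ID" ++ ": " ++
        PySem.Str.slice (pvGet tc "name" "No name") none (some 50) ++ "\n")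
      = (fun s tc => s ++ ("  - " ++ pvGet tc "tc_id" "No ID" ++ ": " ++
        PySem.Str.slice (pvGet tc "name" "No name") none (some 50) ++ "\n"))
      from by funext s tc; simp [String.append_assoc]]
    rw [pvFoldl_join]
    split_ifs with h <;>
      · simp [pvJoin_append, pvJoin_cons, pvJoin_nil, String.append_assoc]
        congr 2
        funext tc
        simp [pvLine, String.append_assoc]
  rw [hf]; rfl
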